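-- pv_equiv track=rewrite | github.com/lfsoftware13/ProgramFix | experiment/parse_xy_util.py | create_split_position_by_position_list
-- ===== SOURCE A (Python) =====
-- def create_split_position_by_position_list(position_list):
--     is_first_fn = lambda ind: ind == 0 or (position_list[ind] != position_list[ind-1]+1)
--     is_last_fn = lambda ind: ind == (len(position_list)-1) or (position_list[ind]+1) != position_list[ind+1]
--     first_position_index = list(filter(is_first_fn, range(len(position_list))))
--     last_position_index = list(filter(is_last_fn, range(len(position_list))))
--     first_position = [position_list[i] for i in first_position_index]
--     last_position = [position_list[i] for i in last_position_index]
--     split_position = list(zip(first_position, last_position))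
--     return split_position
-- ===== SOURCE B (Python) =====
-- def create_split_position_by_position_list(position_list):
--     result = []
--     cur = None  # (start, prev) of the currently open run
--     for v in position_list:
--         if cur is None:
--             cur = (v, v)
--         elif cur[1] + 1 == v:
--             cur = (cur[0], v)
--         else:
--             result.append(cur)
--             cur = (v, v)
--     if cur is not None:
--         result.append(cur)
--     return result
-- ===== Notes on version B (the rewrite author's own statement) =====
-- stated objective: simpler
-- what changed: Replaced the two index filters, two comprehensions and zip with one left-to-right pass that maintains the open run (start, prev) and emits a pair when the run breaks.
import Mathlib
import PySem

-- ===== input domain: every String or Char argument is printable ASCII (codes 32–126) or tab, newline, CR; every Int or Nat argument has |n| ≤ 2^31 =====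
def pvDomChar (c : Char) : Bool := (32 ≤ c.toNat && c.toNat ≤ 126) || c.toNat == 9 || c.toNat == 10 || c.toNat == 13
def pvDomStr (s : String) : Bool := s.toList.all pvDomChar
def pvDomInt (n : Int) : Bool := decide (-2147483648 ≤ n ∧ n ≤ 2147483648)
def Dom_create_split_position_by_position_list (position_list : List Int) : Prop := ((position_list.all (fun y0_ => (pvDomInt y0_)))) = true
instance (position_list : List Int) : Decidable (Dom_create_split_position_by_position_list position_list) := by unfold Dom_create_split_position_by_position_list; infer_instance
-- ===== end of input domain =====

-- B replaces A's two index filters + two comprehensions + zip by one pass keeping the open run (start, prev); objective: simpler.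

-- ===== PORT A =====
-- is_first_fn: ind == 0 or position_list[ind] != position_list[ind-1]+1
-- (indices produced by range(len) are always in range, the short-circuit keeps ind-1 in range,
--  so plain getD is exact here)
def pvIsFirst (position_list : List Int) (ind : Nat) : Bool :=
  ind == 0 || position_list.getD ind 0 != position_list.getD (ind - 1) 0 + 1

-- is_last_fn: ind == len(position_list)-1 or position_list[ind]+1 != position_list[ind+1]
def pvIsLast (position_list : List Int) (ind : Nat) : Bool :=
  ind == position_list.length - 1 || position_list.getD ind 0 + 1 != position_list.getD (ind + 1) 0

def create_split_position_by_position_list (position_list : List Int) : List (Int × Int) :=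
  let first_position_index := (List.range position_list.length).filter (pvIsFirst position_list)
  let last_position_index := (List.range position_list.length).filter (pvIsLast position_list)
  let first_position := first_position_index.map (fun i => position_list.getD i 0)
  let last_position := last_position_index.map (fun i => position_list.getD i 0)
  List.zip first_position last_position

-- ===== PORT B =====
-- one step of Source B's loop; the state is (result, cur) with cur = none or the open run (start, prev)
def pvStep (st : List (Int × Int) × Option (Int × Int)) (v : Int) :
    List (Int × Int) × Option (Int × Int) :=
  match st.2 with
  | none => (st.1, some (v, v))
  | some (s, p) => if p + 1 = v then (st.1, some (s, v)) else (st.1 ++ [(s, p)], some (v, v))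

def create_split_position_by_position_list_alt (position_list : List Int) : List (Int × Int) :=
  let r := position_list.foldl pvStep ([], none)
  match r.2 with
  | none => r.1
  | some sp => r.1 ++ [sp]

-- ===== PRECONDITION & SPEC =====
def Spec_create_split_position_by_position_list (position_list : List Int) (out : List (Int × Int)) : Prop := out = create_split_position_by_position_list_alt position_list
instance (position_list : List Int) (out : List (Int × Int)) : Decidable (Spec_create_split_position_by_position_list position_list out) := by unfold Spec_create_split_position_by_position_list; infer_instance

-- ===== CLAIM (what is proved, stated in full; the proofs are below) =====
def Claim_equal_create_split_position_by_position_list : Prop := ∀ (position_list : List Int), Dom_create_split_position_by_position_list position_list → Spec_create_split_position_by_position_list position_list (create_split_position_by_position_list position_list)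

-- ===== LEMMAS AND PROOFS =====

-- Reference recursion: go vs s p processes the rest vs with open run (start s, last value p).
def pvGo : List Int → Int → Int → List (Int × Int)
  | [], s, p => [(s, p)]
  | v :: vs, s, p => if p + 1 = v then pvGo vs s v else (s, p) :: pvGo vs v v

-- run starts of vs given previous value p
def pvFirstsAux : Int → List Int → List Int
  | _, [] => []
  | p, v :: vs => if v = p + 1 then pvFirstsAux v vs else v :: pvFirstsAux v vs

-- run ends of p :: vs
def pvLastsAux : Int → List Int → List Int
  | p, [] => [p]
  | p, v :: vs => if p + 1 = v then pvLastsAux v vs else p :: pvLastsAux v vs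

lemma pvGo_zip : ∀ (vs : List Int) (s p : Int),
    pvGo vs s p = List.zip (s :: pvFirstsAux p vs) (pvLastsAux p vs) := by
  intro vs
  induction vs with
  | nil => intro s p; simp [pvGo, pvFirstsAux, pvLastsAux]
  | cons v vs ih =>
    intro s p
    by_cases h : p + 1 = v
    · subst h
      simp [pvGo, pvFirstsAux, pvLastsAux, ih]
    · have hv : ¬ v = p + 1 := fun e => h e.symm
      simp only [pvGo, pvFirstsAux, pvLastsAux, if_neg h, if_neg hv, ih,
        List.zip_cons_cons]

lemma pvFirsts_shift : ∀ (vs : List Int) (p : Int),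
    ((List.range vs.length).filter
        (fun i => vs.getD i 0 != (p :: vs).getD i 0 + 1)).map (fun i => vs.getD i 0)
      = pvFirstsAux p vs := by
  intro vs
  induction vs with
  | nil => intro p; simp [pvFirstsAux]
  | cons v vs ih =>
    intro p
    show (((List.range (vs.length + 1)).filter
        (fun i => (v :: vs).getD i 0 != (p :: v :: vs).getD i 0 + 1)).map
        (fun i => (v :: vs).getD i 0)) = pvFirstsAux p (v :: vs)
    rw [List.range_succ_eq_map, List.filter_cons]
    by_cases h : v = p + 1
    · rw [if_neg (by simp [h])]
      rw [List.filter_map, List.map_map]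
      simp only [Function.comp_def, Nat.succ_eq_add_one, List.getD_cons_succ]
      rw [ih v]
      simp [pvFirstsAux, h]
    · rw [if_pos (by simp [h]), List.map_cons]
      rw [List.filter_map, List.map_map]
      simp only [Function.comp_def, Nat.succ_eq_add_one, List.getD_cons_succ,
        List.getD_cons_zero]
      rw [ih v]
      simp [pvFirstsAux, h]

lemma pvLasts_shift : ∀ (vs : List Int) (p : Int),
    ((List.range (vs.length + 1)).filter
        (fun i => i == vs.length || (p :: vs).getD i 0 + 1 != vs.getD i 0)).map
        (fun i => (p :: vs).getD i 0)
      = pvLastsAux p vs := by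
  intro vs
  induction vs with
  | nil => intro p; simp [pvLastsAux]
  | cons v vs ih =>
    intro p
    have hsucc : ∀ (i n : Nat), ((i + 1 == n + 1) : Bool) = (i == n) := by
      intro i n; by_cases h : i = n <;> simp [h]
    rw [List.range_succ_eq_map, List.filter_cons]
    by_cases h : p + 1 = v
    · rw [if_neg (by simp [h])]
      rw [List.filter_map, List.map_map]
      simp only [Function.comp_def, Nat.succ_eq_add_one, List.getD_cons_succ,
        List.length_cons, hsucc]
      rw [ih v]
      simp [pvLastsAux, h]
    · rw [if_pos (by simp [h]), List.map_cons]
      rw [List.filter_map, List.map_map]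
      simp only [Function.comp_def, Nat.succ_eq_add_one, List.getD_cons_succ,
        List.getD_cons_zero, List.length_cons, hsucc]
      rw [ih v]
      simp [pvLastsAux, h]

-- A on v :: vs is the reference recursion started with run (v, v)
lemma A_eq_go (v : Int) (vs : List Int) :
    create_split_position_by_position_list (v :: vs) = pvGo vs v v := by
  rw [pvGo_zip]
  show List.zip
      (((List.range (v :: vs).length).filter (pvIsFirst (v :: vs))).map
        (fun i => (v :: vs).getD i 0))
      (((List.range (v :: vs).length).filter (pvIsLast (v :: vs))).map
        (fun i => (v :: vs).getD i 0))
    = List.zip (v :: pvFirstsAux v vs) (pvLastsAux v vs)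
  congr 1
  · -- first_position = v :: pvFirstsAux v vs
    rw [show (v :: vs).length = vs.length + 1 from rfl, List.range_succ_eq_map,
      List.filter_cons]
    rw [if_pos (show pvIsFirst (v :: vs) 0 = true from rfl), List.map_cons]
    rw [List.filter_map, List.map_map]
    have hpred : (pvIsFirst (v :: vs) ∘ Nat.succ)
        = fun i => vs.getD i 0 != (v :: vs).getD i 0 + 1 := by
      funext i
      simp [pvIsFirst, Function.comp, Nat.succ_eq_add_one]
    have hmap : ((fun i => (v :: vs).getD i 0) ∘ Nat.succ)
        = fun i => vs.getD i 0 := by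
      funext i; simp [Function.comp, Nat.succ_eq_add_one]
    rw [hpred, hmap, pvFirsts_shift]
    simp
  · -- last_position = pvLastsAux v vs
    have hpred : ∀ i ∈ List.range (v :: vs).length,
        pvIsLast (v :: vs) i
          = (i == vs.length || (v :: vs).getD i 0 + 1 != vs.getD i 0) := by
      intro i _
      rcases i with _ | j
      · simp [pvIsLast]
      · simp [pvIsLast]
    rw [show (v :: vs).length = vs.length + 1 from rfl] at hpred ⊢
    rw [List.filter_congr hpred, pvLasts_shift]

-- Source B's loop with an open run computes res ++ pvGo
lemma foldl_pvStep : ∀ (vs : List Int) (res : List (Int × Int)) (s p : Int),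
    (match (vs.foldl pvStep (res, some (s, p))).2 with
      | none => (vs.foldl pvStep (res, some (s, p))).1
      | some sp => (vs.foldl pvStep (res, some (s, p))).1 ++ [sp])
      = res ++ pvGo vs s p := by
  intro vs
  induction vs with
  | nil => intro res s p; simp [pvGo]
  | cons v vs ih =>
    intro res s p
    by_cases h : p + 1 = v
    · simp only [List.foldl_cons, pvStep, if_pos h, pvGo]
      exact ih res s v
    · simp only [List.foldl_cons, pvStep, if_neg h, pvGo]
      rw [ih (res ++ [(s, p)]) v v]
      simp

lemma alt_eq_go (v : Int) (vs : List Int) :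
    create_split_position_by_position_list_alt (v :: vs) = pvGo vs v v := by
  unfold create_split_position_by_position_list_alt
  simpa [pvStep] using foldl_pvStep vs [] v v

-- ===== VERDICT (by name: the statement is the Claim_ definition above) =====
theorem create_split_position_by_position_list_spec : Claim_equal_create_split_position_by_position_list := by
  intro l _
  unfold Spec_create_split_position_by_position_list
  cases l with
  | nil => rfl
  | cons v vs => rw [A_eq_go, alt_eq_go]
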